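-- pv_equiv track=rewrite | github.com/steveaigbe/ComSto | miscModules.py | outlierStats
-- ===== SOURCE A (Python) =====
-- def outlierStats(outList):
--     size = len(outList)
--     if size == 0:
--         outlier = 0
--         maxOutlier = 0
--         return (outlier, maxOutlier)
--     else:
--         outDict = {}
--         for i in outList:
--             if i not in outDict.keys():
--                 outDict[i] = 1
--             else:
--                 outDict[i] = outDict[i] + 1
--         outlier = sum(outDict.values())
--         maxOutlier = max(outDict.keys())
--         return (outlier, maxOutlier)
-- ===== SOURCE B (Python) =====
-- def outlierStats(outList):
--     if not outList:
--         return (0, 0)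
--     count = 0
--     maxOutlier = outList[0]
--     for i in outList:
--         count += 1
--         if i > maxOutlier:
--             maxOutlier = i
--     return (count, maxOutlier)
-- ===== Notes on version B (the rewrite author's own statement) =====
-- stated objective: faster
-- what changed: Replaces the frequency-dict build plus two-phase aggregation (sum of values, max of keys) by a single pass keeping a running count and running maximum.
import Mathlib
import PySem

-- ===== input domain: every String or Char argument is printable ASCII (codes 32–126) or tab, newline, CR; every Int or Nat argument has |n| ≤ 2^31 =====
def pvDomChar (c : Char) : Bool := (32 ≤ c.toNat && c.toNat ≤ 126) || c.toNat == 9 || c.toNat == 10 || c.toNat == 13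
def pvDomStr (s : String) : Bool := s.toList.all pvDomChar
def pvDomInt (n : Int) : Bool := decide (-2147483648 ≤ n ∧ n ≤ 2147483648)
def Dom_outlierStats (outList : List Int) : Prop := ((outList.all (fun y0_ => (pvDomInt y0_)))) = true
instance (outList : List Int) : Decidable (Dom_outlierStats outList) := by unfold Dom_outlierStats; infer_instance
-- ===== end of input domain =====

-- B replaces A's frequency-dict build and two-phase aggregation (sum of values / max of keys)
-- by one pass keeping a running count and a running maximum: simpler.

-- ===== PORT A =====
def outlierStats (outList : List Int) : List Int :=
  let size := outList.length
  if size = 0 then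
    [0, 0]
  else
    let outDict := outList.foldl
      (fun d i =>
        if d.contains i = false then d.insert i 1
        else d.insert i (d.getD i 0 + 1))
      (PySem.Dict.empty : PySem.Dict Int Int)
    let outlier := outDict.values.sum
    -- keys are nonempty in this branch, so Python's max never raises; the .getD 0 default is unreachable
    let maxOutlier := (PySem.List.max? outDict.keys (fun x => x)).getD 0
    [outlier, maxOutlier]

-- ===== PORT B =====
def outlierStats_alt (outList : List Int) : List Int :=
  match outList with
  | [] => [0, 0]
  | h :: _ =>
    let p := outList.foldl
      (fun (p : Int × Int) i => (p.1 + 1, if i > p.2 then i else p.2)) (0, h)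
    [p.1, p.2]

-- ===== PRECONDITION & SPEC =====
def Spec_outlierStats (outList : List Int) (out : List Int) : Prop := out = outlierStats_alt outList
instance (outList : List Int) (out : List Int) : Decidable (Spec_outlierStats outList out) := by unfold Spec_outlierStats; infer_instance

-- ===== CLAIM (what is proved, stated in full; the proofs are below) =====
def Claim_equal_outlierStats : Prop := ∀ (outList : List Int), Dom_outlierStats outList → Spec_outlierStats outList (outlierStats outList)

-- ===== LEMMAS AND PROOFS =====

-- A's loop body is exactly the counting update d[i] = d.get(i, 0) + 1
theorem pv_step_eq_modify (d : PySem.Dict Int Int) (i : Int) :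
    (if d.contains i = false then d.insert i 1
     else d.insert i (d.getD i 0 + 1)) = d.modify i 0 (· + 1) := by
  by_cases h : d.contains i = false
  · have hn : d.get? i = none := (PySem.Dict.get?_eq_none_iff_contains d i).mpr h
    simp [h, PySem.Dict.modify, PySem.Dict.getD, hn]
  · simp [h, PySem.Dict.modify, PySem.Dict.getD]

-- B's fold computes (length, running max)
theorem pv_foldl_pair (l : List Int) (c m : Int) :
    l.foldl (fun (p : Int × Int) i => (p.1 + 1, if i > p.2 then i else p.2)) (c, m)
      = (c + l.length, l.foldl max m) := by
  induction l generalizing c m with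
  | nil => simp
  | cons x t ih =>
    have hmax : (if x > m then x else m) = max m x := by
      split_ifs with h <;> omega
    simp [List.foldl_cons, hmax, ih]
    omega

theorem pv_sum_counts (l : List Int) :
    (((PySem.Set.ofList l).map fun k => ((l.count k : Int))).sum) = (l.length : Int) := by
  have hperm : (PySem.Set.ofList l).Perm l.dedup := by
    refine (List.perm_ext_iff_of_nodup (PySem.Set.nodup_ofList l) l.nodup_dedup).mpr ?_
    intro a
    rw [PySem.Set.mem_ofList, List.mem_dedup]
  have := (hperm.map (fun k => ((l.count k : Int)))).sum_eq
  rw [this]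
  have hnat : ((l.dedup.map fun k => l.count k).sum) = l.length :=
    List.sum_map_count_dedup_eq_length l
  have : (l.dedup.map fun k => ((l.count k : Int))).sum
      = ((l.dedup.map fun k => l.count k).sum : Int) := by
    induction l.dedup with
    | nil => simp
    | cons x t ih => simp [ih]
  rw [this, hnat]

-- ===== VERDICT (by name: the statement is the Claim_ definition above) =====
theorem outlierStats_spec : Claim_equal_outlierStats := by
  intro outList _
  unfold Spec_outlierStats outlierStats outlierStats_alt
  cases outList with
  | nil => simp
  | cons h t =>
    simp only [List.length_cons, Nat.succ_ne_zero]
    have hstep : (fun (d : PySem.Dict Int Int) i =>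
        if d.contains i = false then d.insert i 1
        else d.insert i (d.getD i 0 + 1)) = fun d i => d.modify i 0 (· + 1) := by
      funext d i; exact pv_step_eq_modify d i
    rw [hstep]
    set l := h :: t with hl
    set D := l.foldl (fun (d : PySem.Dict Int Int) i => d.modify i 0 (· + 1)) PySem.Dict.empty with hD
    have hkeys : D.keys = PySem.Set.ofList l := by
      rw [hD, PySem.Dict.keys_foldl_modify]
      simp [PySem.Dict.keys_empty, PySem.Set.update_nil_left]
    have hnodup : D.keys.Nodup := by rw [hkeys]; exact PySem.Set.nodup_ofList l
    have hgetD : ∀ v, D.getD v 0 = (l.count v : Int) := by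
      intro v
      rw [hD, PySem.Dict.getD_foldl_modify_add_one]
      simp [PySem.Dict.getD_empty]
    -- sum of values = length
    have hsum : D.values.sum = (l.length : Int) := by
      rw [PySem.Dict.values_eq_map_keys D hnodup 0, hkeys]
      calc ((PySem.Set.ofList l).map fun k => D.getD k 0).sum
          = ((PySem.Set.ofList l).map fun k => ((l.count k : Int))).sum := by
            congr 1; exact List.map_congr_left (fun x _ => hgetD x)
        _ = (l.length : Int) := pv_sum_counts l
    -- max of keys = running max
    have hmaxB : PySem.List.max? l (fun y => y) = some (t.foldl max h) := by
      rw [hl]; exact PySem.List.max?_id_cons h t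
    have hmaxA : PySem.List.max? D.keys (fun y => y) = some (t.foldl max h) := by
      have hne : D.keys ≠ [] := by
        rw [hkeys]
        intro hc
        have : h ∈ (PySem.Set.ofList l : List Int) := by
          rw [PySem.Set.mem_ofList]; simp [hl]
        simp [hc] at this
      obtain ⟨mA, hmA⟩ : ∃ m, PySem.List.max? D.keys (fun y => y) = some m := by
        cases hcase : PySem.List.max? D.keys (fun y => y) with
        | none => exact absurd ((PySem.List.max?_eq_none_iff D.keys (fun y => y)).mp hcase) hne
        | some m => exact ⟨m, rfl⟩
      have hmemA : mA ∈ l := by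
        have := PySem.List.max?_mem hmA
        rwa [hkeys, PySem.Set.mem_ofList] at this
      have hboundA : ∀ y ∈ l, y ≤ mA := by
        intro y hy
        exact PySem.List.max?_isMax hmA y (by rwa [hkeys, PySem.Set.mem_ofList])
      have hmemB : t.foldl max h ∈ l := PySem.List.max?_mem hmaxB
      have hboundB : ∀ y ∈ l, y ≤ t.foldl max h := PySem.List.max?_isMax hmaxB
      have : mA = t.foldl max h :=
        le_antisymm (hboundB mA hmemA) (hboundA _ hmemB)
      rw [hmA, this]
    -- assemble
    have hfold := pv_foldl_pair l 0 h
    simp only [hl] at hfold hsum hmaxA ⊢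
    rw [hfold]
    simp only [List.foldl_cons, max_self] at *
    rw [hsum, hmaxA]
    simp
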